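-- pv_equiv track=rewrite | github.com/srinivasuk/sd-mqtt-printer-client | src/utils/bitmap.py | decode_bit_packed_bitmap
-- ===== SOURCE A (Python) =====
-- from typing import List, Tuple
--
-- def decode_bit_packed_bitmap(data: List[int], width: int, height: int) -> List[int]:
--     """
--     Decode bit-packed bitmap data to pixel array.
--
--     Args:
--         data: Bit-packed bitmap data (each byte contains 8 pixels)
--         width: Bitmap width in pixels
--         height: Bitmap height in pixels
--
--     Returns:
--         List of pixel values (0=black, 255=white)
--     """
--     pixels = []
--     bytes_per_row = (width + 7) // 8
--
--     for y in range(height):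
--         for x in range(width):
--             byte_index = y * bytes_per_row + (x // 8)
--             bit_index = 7 - (x % 8)  # MSB first
--
--             if byte_index < len(data):
--                 byte_value = data[byte_index]
--                 is_black = (byte_value & (1 << bit_index)) != 0
--                 pixels.append(0 if is_black else 255)
--             else:
--                 pixels.append(255)  # Default to white if out of bounds
--
--     return pixels
-- ===== SOURCE B (Python) =====
-- from typing import List
--
-- def decode_bit_packed_bitmap(data: List[int], width: int, height: int) -> List[int]:
--     """Row-by-row byte walk: take min(8, remaining) bits MSB-first from each
--     row byte, emitting 0 for a set bit and 255 otherwise; byte positions past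
--     the end of data contribute white pixels."""
--     pixels = []
--     bytes_per_row = (width + 7) // 8
--     n = len(data)
--     for y in range(height):
--         row_start = y * bytes_per_row
--         remaining = width
--         for bx in range(bytes_per_row):
--             count = min(8, remaining)
--             idx = row_start + bx
--             if idx < n:
--                 b = data[idx]
--                 for i in range(count):
--                     pixels.append(0 if (b >> (7 - i)) & 1 else 255)
--             else:
--                 pixels.extend([255] * count)
--             remaining -= count
--     return pixels
-- ===== Notes on version B (the rewrite author's own statement) =====
-- stated objective: alternative
-- what changed: B replaces A's per-pixel loop that recomputes byte_index and bit_index for every pixel with a per-row walk over the row's bytes, emitting min(8, remaining) pixels per byte via (b >> (7-i)) & 1 and count copies of 255 for bytes past the end of data.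
import Mathlib
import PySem

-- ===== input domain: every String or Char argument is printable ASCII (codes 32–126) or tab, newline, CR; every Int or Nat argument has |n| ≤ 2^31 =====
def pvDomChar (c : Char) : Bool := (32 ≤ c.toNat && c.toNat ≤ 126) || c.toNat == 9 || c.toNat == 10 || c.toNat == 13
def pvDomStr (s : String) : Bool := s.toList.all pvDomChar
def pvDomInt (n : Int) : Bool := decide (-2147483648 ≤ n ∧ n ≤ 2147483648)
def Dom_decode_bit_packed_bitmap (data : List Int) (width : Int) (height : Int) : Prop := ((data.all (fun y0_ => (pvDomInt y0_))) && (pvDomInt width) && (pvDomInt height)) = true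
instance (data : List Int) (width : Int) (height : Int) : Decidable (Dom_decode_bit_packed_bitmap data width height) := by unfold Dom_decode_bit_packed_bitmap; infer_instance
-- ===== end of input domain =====

-- B decodes row by row, walking each row's bytes once and emitting min(8, remaining) pixels per byte,
-- instead of recomputing byte/bit indices per pixel (objective: simpler per-row decomposition).

-- ===== PORT A =====
def decode_bit_packed_bitmap (data : List Int) (width : Int) (height : Int) : List Int :=
  let bytes_per_row := PySem.Int.floordiv (width + 7) 8
  (PySem.List.pyRange 0 height 1).foldl (fun pixels y =>
    (PySem.List.pyRange 0 width 1).foldl (fun pixels x =>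
      let byte_index := y * bytes_per_row + PySem.Int.floordiv x 8
      let bit_index := 7 - PySem.Int.mod x 8   -- MSB first
      if byte_index < (data.length : Int) then
        let byte_value := PySem.List.pyGetD data byte_index 0   -- guard gives byte_index < len; byte_index ≥ 0 in every executed iteration
        let is_black : Bool := PySem.Int.band byte_value ((1 : Int) <<< bit_index.toNat) != 0  -- 1 << bit_index; bit_index ∈ [0,7] so .toNat is exact
        pixels ++ [if is_black then 0 else 255]
      else
        pixels ++ [255]) pixels) []

-- ===== PORT B =====
def decode_bit_packed_bitmap_alt (data : List Int) (width : Int) (height : Int) : List Int :=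
  let bytes_per_row := PySem.Int.floordiv (width + 7) 8
  let n : Int := data.length
  (PySem.List.pyRange 0 height 1).foldl (fun pixels y =>
    let row_start := y * bytes_per_row
    ((PySem.List.pyRange 0 bytes_per_row 1).foldl (fun (st : List Int × Int) bx =>
      let count := min 8 st.2
      let idx := row_start + bx
      let pixels' :=
        if idx < n then
          let b := PySem.List.pyGetD data idx 0   -- guard gives idx < n; idx ≥ 0 in every executed iteration
          (PySem.List.pyRange 0 count 1).foldl (fun pixels i =>
            pixels ++ [if PySem.Int.band (b >>> (7 - i).toNat) 1 != 0 then 0 else 255]) st.1  -- (b >> (7-i)) & 1; 7-i ∈ [0,7] so .toNat is exact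
        else
          st.1 ++ List.replicate count.toNat 255   -- pixels.extend([255] * count)
      (pixels', st.2 - count)) (pixels, width)).1) []

-- ===== PRECONDITION & SPEC =====
def Spec_decode_bit_packed_bitmap (data : List Int) (width : Int) (height : Int) (out : List Int) : Prop := out = decode_bit_packed_bitmap_alt data width height
instance (data : List Int) (width : Int) (height : Int) (out : List Int) : Decidable (Spec_decode_bit_packed_bitmap data width height out) := by unfold Spec_decode_bit_packed_bitmap; infer_instance

-- ===== CLAIM (what is proved, stated in full; the proofs are below) =====
def Claim_equal_decode_bit_packed_bitmap : Prop := ∀ (data : List Int) (width : Int) (height : Int), Dom_decode_bit_packed_bitmap data width height → Spec_decode_bit_packed_bitmap data width height (decode_bit_packed_bitmap data width height)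

-- ===== LEMMAS AND PROOFS =====

-- bytes per row, as both ports compute it
def pvBpr (width : Int) : Int := PySem.Int.floordiv (width + 7) 8

-- the pixel A emits for byte index bi and bit position i (i = x % 8)
def pvPix (data : List Int) (bi : Int) (i : Int) : Int :=
  if bi < (data.length : Int) then
    (if PySem.Int.band (PySem.List.pyGetD data bi 0) ((1 : Int) <<< (7 - i).toNat) != 0 then 0 else 255)
  else 255

-- one decoded row
def pvRow (data : List Int) (width : Int) (y : Int) : List Int :=
  (PySem.List.pyRange 0 width 1).map
    (fun x => pvPix data (y * pvBpr width + PySem.Int.floordiv x 8) (PySem.Int.mod x 8))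

lemma pvBpr_bounds (w : Int) : pvBpr w * 8 ≤ w + 7 ∧ w + 7 < (pvBpr w + 1) * 8 := by
  have h1 := PySem.Int.floordiv_mul_add_mod (w + 7) 8
  have h2 := PySem.Int.mod_nonneg (w + 7) (b := 8) (by norm_num)
  have h3 := PySem.Int.mod_lt (w + 7) (b := 8) (by norm_num)
  unfold pvBpr
  omega

lemma nat_bit (n k : Nat) : (n >>> k) &&& 1 = if n.testBit k then 1 else 0 := by
  rw [Nat.and_one_is_mod, Nat.testBit_eq_decide_div_mod_eq, Nat.shiftRight_eq_div_pow]
  rcases Nat.mod_two_eq_zero_or_one (n / 2 ^ k) with h | h <;> simp [h]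

-- Python bit-test equivalence: (b >> k) & 1 != 0  =  b & (1 << k) != 0, for every Int b (incl. negatives)
lemma pv_bit_eq (b : Int) (k : Nat) :
    (PySem.Int.band (b >>> (k : Int)) 1 != 0) = (PySem.Int.band b ((1 : Int) <<< k) != 0) := by
  rw [Int.shiftRight_natCast_right]
  have hmask : ((1 : Int) <<< k) = Int.ofNat (1 <<< k) := rfl
  have hm2 : (1 : Nat) <<< k = 2 ^ k := by simp [Nat.shiftLeft_eq]
  cases b with
  | ofNat m =>
    have hs : (Int.ofNat m) >>> k = Int.ofNat (m >>> k) := rfl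
    rw [hs, hmask]
    unfold PySem.Int.band
    simp only [Int.ofNat_eq_natCast]
    rw [if_pos (Int.natCast_nonneg _), if_pos (by norm_num), if_pos (Int.natCast_nonneg _),
        if_pos (Int.natCast_nonneg _)]
    simp only [Int.toNat_natCast, Int.toNat_one, nat_bit, hm2, Nat.and_two_pow]
    rcases h : m.testBit k <;> simp
  | negSucc m =>
    have hs : (Int.negSucc m) >>> k = Int.negSucc (m >>> k) := rfl
    have hneg : ∀ t : Nat, ¬ (0 : Int) ≤ Int.negSucc t := fun t => by omega
    have htn : ∀ t : Nat, (-(Int.negSucc t) - 1).toNat = t := fun t => by omega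
    rw [hs, hmask]
    unfold PySem.Int.band
    simp only [Int.ofNat_eq_natCast]
    rw [if_neg (hneg _), if_pos (by norm_num), if_neg (hneg _), if_pos (Int.natCast_nonneg _)]
    simp only [Int.toNat_natCast, Int.toNat_one, htn,
      Nat.and_comm 1, nat_bit, hm2, Nat.and_comm (2 ^ k) m, Nat.and_two_pow]
    rcases h : m.testBit k <;> simp

lemma A_eq_flatMap (data : List Int) (w h : Int) :
    decode_bit_packed_bitmap data w h
      = (PySem.List.pyRange 0 h 1).flatMap (fun y => pvRow data w y) := by
  unfold decode_bit_packed_bitmap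
  have hrow : ∀ (y : Int) (pixels : List Int),
      (PySem.List.pyRange 0 w 1).foldl (fun pixels x =>
        if y * PySem.Int.floordiv (w + 7) 8 + PySem.Int.floordiv x 8 < (data.length : Int) then
          pixels ++ [if (PySem.Int.band (PySem.List.pyGetD data (y * PySem.Int.floordiv (w + 7) 8 + PySem.Int.floordiv x 8) 0) ((1 : Int) <<< (7 - PySem.Int.mod x 8).toNat) != 0 : Bool) then 0 else 255]
        else
          pixels ++ [255]) pixels
        = pixels ++ pvRow data w y := by
    intro y pixels
    unfold pvRow
    rw [← PySem.List.foldl_append_singleton_eq_map]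
    apply PySem.List.foldl_congr_mem
    intro acc x _
    unfold pvPix pvBpr
    split <;> rfl
  calc (PySem.List.pyRange 0 h 1).foldl _ []
      = (PySem.List.pyRange 0 h 1).foldl (fun pixels y => pixels ++ pvRow data w y) [] := by
        apply PySem.List.foldl_congr_mem
        intro acc y _
        exact hrow y acc
    _ = [] ++ (PySem.List.pyRange 0 h 1).flatMap (fun y => pvRow data w y) := by
        rw [PySem.List.foldl_append_eq_flatMap]
    _ = _ := by simp

-- the step function of B's inner byte loop, for row y (definitionally the lambda in the port)
def pvStep (data : List Int) (w y : Int) (st : List Int × Int) (bx : Int) : List Int × Int :=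
  (if y * pvBpr w + bx < (data.length : Int) then
     (PySem.List.pyRange 0 (min 8 st.2) 1).foldl (fun pixels i =>
       pixels ++ [if PySem.Int.band ((PySem.List.pyGetD data (y * pvBpr w + bx) 0) >>> (7 - i).toNat) 1 != 0 then 0 else 255]) st.1
   else
     st.1 ++ List.replicate (min 8 st.2).toNat 255,
   st.2 - min 8 st.2)

-- one in-range byte emits exactly the pixels of x ∈ [8a, 8a+c)
lemma pvChunk (data : List Int) (w y a c : Int) (h0 : 0 ≤ c) (h8 : c ≤ 8) :
    (PySem.List.pyRange 0 c 1).map (fun i =>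
        if PySem.Int.band ((PySem.List.pyGetD data (y * pvBpr w + a) 0) >>> (7 - i).toNat) 1 != 0 then (0:Int) else 255)
      = (PySem.List.pyRange (8*a) (8*a + c) 1).map (fun x =>
          (if PySem.Int.band (PySem.List.pyGetD data (y * pvBpr w + PySem.Int.floordiv x 8) 0) ((1 : Int) <<< (7 - PySem.Int.mod x 8).toNat) != 0 then (0:Int) else 255)) := by
  rw [PySem.List.pyRange_one 0 c, PySem.List.pyRange_one (8*a) (8*a+c)]
  have : (8*a + c - 8*a) = c - 0 := by ring
  rw [this]
  rw [List.map_map, List.map_map]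
  apply List.map_congr_left
  intro k hk
  have hkc : (k : Int) < c := by
    have := List.mem_range.mp hk
    omega
  have hk0 : (0:Int) ≤ (k:Int) := by positivity
  simp only [Function.comp]
  have hdiv : PySem.Int.floordiv (8*a + k) 8 = a := by
    rw [PySem.Int.floordiv_eq_iff_of_pos (by norm_num)]
    omega
  have hmod : PySem.Int.mod (8*a + k) 8 = (k : Int) := by
    have := PySem.Int.floordiv_mul_add_mod (8*a + (k:Int)) 8
    rw [hdiv] at this
    omega
  simp only [zero_add, hdiv, hmod, pv_bit_eq]

-- B's byte loop over bytes [a, bpr), entered with remaining = max (w - 8a) 0, emits the pixels of x ∈ [8a, w)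
lemma pvRowLoop (data : List Int) (w y : Int) :
    ∀ (m : Nat) (a : Int), 0 ≤ a → a ≤ pvBpr w → (pvBpr w - a).toNat = m → ∀ (pixels : List Int),
      (PySem.List.pyRange a (pvBpr w) 1).foldl (pvStep data w y) (pixels, max (w - 8*a) 0)
        = (pixels ++ (PySem.List.pyRange (8*a) w 1).map (fun x =>
            pvPix data (y * pvBpr w + PySem.Int.floordiv x 8) (PySem.Int.mod x 8)),
           max (w - 8 * pvBpr w) 0) := by
  have hb := pvBpr_bounds w
  intro m
  induction m with
  | zero =>
    intro a ha0 hab hm pixels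
    have ha : a = pvBpr w := by omega
    subst ha
    rw [PySem.List.pyRange_one_eq_nil (le_refl _), PySem.List.pyRange_one_eq_nil (by omega)]
    simp
  | succ m ih =>
    intro a ha0 hab hm pixels
    have halt : a < pvBpr w := by omega
    have haw : 8 * a < w := by omega
    rw [PySem.List.pyRange_one_cons halt]
    simp only [List.foldl_cons]
    have hr : max (w - 8*a) 0 = w - 8*a := by omega
    set c := min 8 (w - 8*a) with hc
    have hc0 : 0 ≤ c := by omega
    have hc8 : c ≤ 8 := by omega
    have hstep : pvStep data w y (pixels, max (w - 8*a) 0) a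
        = (pixels ++ (PySem.List.pyRange (8*a) (8*a + c) 1).map (fun x =>
            pvPix data (y * pvBpr w + PySem.Int.floordiv x 8) (PySem.Int.mod x 8)),
           max (w - 8*(a+1)) 0) := by
      unfold pvStep
      rw [hr]
      congr 1
      · by_cases hidx : y * pvBpr w + a < (data.length : Int)
        · rw [if_pos hidx]
          rw [PySem.List.foldl_append_singleton_eq_map, ← hc, pvChunk data w y a c hc0 hc8]
          congr 1
          apply List.map_congr_left
          intro x hx
          have hxb := (PySem.List.mem_pyRange_one).mp hx
          have hdivx : PySem.Int.floordiv x 8 = a := by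
            rw [PySem.Int.floordiv_eq_iff_of_pos (by norm_num)]
            omega
          unfold pvPix
          rw [hdivx, if_pos hidx]
        · rw [if_neg hidx]
          congr 1
          rw [PySem.List.pyRange_one (8*a) (8*a+c)]
          have h1 : (8*a + c - 8*a) = c := by ring
          rw [h1, List.map_map]
          have h2 : ∀ k ∈ List.range c.toNat, ((fun x => pvPix data (y * pvBpr w + PySem.Int.floordiv x 8) (PySem.Int.mod x 8)) ∘ (fun k : Nat => 8*a + (k:Int))) k = (255 : Int) := by
            intro k hk
            have hkc : (k : Int) < c := by
              have := List.mem_range.mp hk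
              omega
            have hdivx : PySem.Int.floordiv (8*a + (k:Int)) 8 = a := by
              rw [PySem.Int.floordiv_eq_iff_of_pos (by norm_num)]
              omega
            simp only [Function.comp, hdivx]
            unfold pvPix
            rw [if_neg hidx]
          rw [List.map_congr_left h2, List.map_const', List.length_range]
      · simp only []; omega
    rw [hstep]
    rw [ih (a+1) (by omega) (by omega) (by omega)]
    rw [List.append_assoc]
    congr 2
    have hsplit : PySem.List.pyRange (8*a) w 1
        = PySem.List.pyRange (8*a) (8*a + c) 1 ++ PySem.List.pyRange (8*a + c) w 1 :=
      PySem.List.pyRange_one_append _ _ _ (by omega) (by omega)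
    rw [hsplit, List.map_append]
    congr 2
    rcases le_or_gt (8*(a+1)) w with hle | hlt
    · have : 8*a + c = 8*(a+1) := by omega
      rw [this]
    · have h1 : 8*a + c = w := by omega
      rw [h1, PySem.List.pyRange_one_eq_nil (le_refl _), PySem.List.pyRange_one_eq_nil (by omega)]

-- B's whole inner loop for one row (definitionally the row body of the port)
def pvRowB (data : List Int) (w y : Int) (pixels : List Int) : List Int :=
  ((PySem.List.pyRange 0 (pvBpr w) 1).foldl (pvStep data w y) (pixels, w)).1

lemma pvRowB_eq (data : List Int) (w y : Int) (pixels : List Int) :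
    pvRowB data w y pixels = pixels ++ pvRow data w y := by
  have hb := pvBpr_bounds w
  unfold pvRowB
  rcases le_or_gt 0 w with hw | hw
  · have e : w = max (w - 8*0) 0 := by omega
    rw [show ((pixels, w) : List Int × Int) = (pixels, max (w - 8*0) 0) from by rw [← e]]
    rw [pvRowLoop data w y (pvBpr w - 0).toNat 0 (le_refl 0) (by omega) rfl pixels]
    unfold pvRow
    norm_num
  · rw [PySem.List.pyRange_one_eq_nil (show pvBpr w ≤ 0 by omega)]
    unfold pvRow
    rw [PySem.List.pyRange_one_eq_nil (by omega)]
    simp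

lemma B_eq_flatMap (data : List Int) (w h : Int) :
    decode_bit_packed_bitmap_alt data w h
      = (PySem.List.pyRange 0 h 1).flatMap (fun y => pvRow data w y) := by
  unfold decode_bit_packed_bitmap_alt
  calc (PySem.List.pyRange 0 h 1).foldl _ []
      = (PySem.List.pyRange 0 h 1).foldl (fun pixels y => pixels ++ pvRow data w y) [] := by
        apply PySem.List.foldl_congr_mem
        intro acc y _
        exact pvRowB_eq data w y acc
    _ = [] ++ (PySem.List.pyRange 0 h 1).flatMap (fun y => pvRow data w y) := by
        rw [PySem.List.foldl_append_eq_flatMap]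
    _ = _ := by simp

-- ===== VERDICT (by name: the statement is the Claim_ definition above) =====
theorem decode_bit_packed_bitmap_spec : Claim_equal_decode_bit_packed_bitmap := by
  intro data width height _
  unfold Spec_decode_bit_packed_bitmap
  rw [A_eq_flatMap, B_eq_flatMap]
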